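-- pv_equiv track=rewrite | github.com/KV-CS/CS2-2020Spring-Classwork | Homework/Homework 2.py | alphNum
-- ===== SOURCE A (Python) =====
-- def alphNum(someText):
--     numOfAlpha = 0
--     countE = 0
--     alpha = 'abcdefghijklmnopqrstuvwxyz'
--
--     for ch in someText:
--         if ch in alpha or ch in alpha.upper():
--             numOfAlpha += 1
--         if ch == 'e' or ch == 'E':
--             countE += 1
--     return numOfAlpha, countE
-- ===== SOURCE B (Python) =====
-- def alphNum(someText):
--     freq = {}
--     for ch in someText:
--         freq[ch] = freq.get(ch, 0) + 1
--     letters = 'abcdefghijklmnopqrstuvwxyzABCDEFGHIJKLMNOPQRSTUVWXYZ'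
--     numOfAlpha = sum(freq.get(c, 0) for c in letters)
--     countE = freq.get('e', 0) + freq.get('E', 0)
--     return numOfAlpha, countE
-- ===== Notes on version B (the rewrite author's own statement) =====
-- stated objective: alternative
-- what changed: B tabulates a character-frequency dictionary in one pass and then derives both answers by summing the table over the fixed 52-letter ASCII alphabet and reading off freq['e']+freq['E'], instead of A's per-character membership tests against the alphabet strings inside the loop.
import Mathlib
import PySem

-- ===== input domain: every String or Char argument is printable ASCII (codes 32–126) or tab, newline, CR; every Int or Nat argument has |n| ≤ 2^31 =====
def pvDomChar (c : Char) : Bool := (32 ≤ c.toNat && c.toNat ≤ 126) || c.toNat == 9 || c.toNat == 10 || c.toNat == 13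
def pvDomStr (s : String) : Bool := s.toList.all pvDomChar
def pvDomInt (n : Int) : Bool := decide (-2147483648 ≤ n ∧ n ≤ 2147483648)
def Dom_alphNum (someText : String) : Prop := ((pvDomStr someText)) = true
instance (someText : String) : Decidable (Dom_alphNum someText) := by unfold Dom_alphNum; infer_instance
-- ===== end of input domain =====

-- B builds a character-frequency table once and derives both answers by summing it over the 52 ASCII letters (alternative decomposition, not claimed faster).


-- ===== PORT A =====
def alphNum (someText : String) : Int × Int :=
  let alpha := "abcdefghijklmnopqrstuvwxyz"
  someText.toList.foldl
    (fun (acc : Int × Int) ch =>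
      let numOfAlpha := if alpha.toList.contains ch || (PySem.Str.upper alpha).toList.contains ch then acc.1 + 1 else acc.1
      let countE := if ch == 'e' || ch == 'E' then acc.2 + 1 else acc.2
      (numOfAlpha, countE))
    (0, 0)

-- ===== PORT B =====
def lettersB : List Char := "abcdefghijklmnopqrstuvwxyzABCDEFGHIJKLMNOPQRSTUVWXYZ".toList

def alphNum_alt (someText : String) : Int × Int :=
  let freq : PySem.Dict Char Int :=
    someText.toList.foldl (fun d ch => d.insert ch (d.getD ch 0 + 1)) PySem.Dict.empty
  let numOfAlpha : Int := (lettersB.map (fun c => freq.getD c 0)).sum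
  let countE : Int := freq.getD 'e' 0 + freq.getD 'E' 0
  (numOfAlpha, countE)

-- ===== PRECONDITION & SPEC =====
def Spec_alphNum (someText : String) (out : Int × Int) : Prop := out = alphNum_alt someText
instance (someText : String) (out : Int × Int) : Decidable (Spec_alphNum someText out) := by unfold Spec_alphNum; infer_instance

-- ===== CLAIM (what is proved, stated in full; the proofs are below) =====
def Claim_equal_alphNum : Prop := ∀ (someText : String), Dom_alphNum someText → Spec_alphNum someText (alphNum someText)

-- ===== LEMMAS AND PROOFS =====

-- counting a disjunction with a fresh first disjunct splits into count + countP
theorem countP_or_split (xs : List Char) (c : Char) (ls : List Char) (hc : c ∉ ls) :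
    xs.countP (fun x => x == c || ls.contains x)
      = xs.count c + xs.countP (fun x => ls.contains x) := by
  induction xs with
  | nil => simp
  | cons x t ih =>
    simp only [List.countP_cons, List.count_cons, ih]
    by_cases hx : x = c
    · subst hx
      simp [hc]
      omega
    · by_cases hm : x ∈ ls
      · simp [hx, hm]
        omega
      · simp [hx, hm]

-- summing the per-letter counts over a duplicate-free letter list is one countP
theorem sum_counts (xs : List Char) (ls : List Char) (h : ls.Nodup) :
    ((ls.map (fun c => (xs.count c : Int))).sum : Int)
      = (xs.countP (fun x => ls.contains x) : Int) := by
  induction ls with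
  | nil => simp
  | cons c t ih =>
    rcases List.nodup_cons.mp h with ⟨hc, ht⟩
    have hsplit := countP_or_split xs c t hc
    have hcong : xs.countP (fun x => (c :: t).contains x)
        = xs.countP (fun x => x == c || t.contains x) :=
      List.countP_congr (fun x _ => by simp [List.contains_eq_mem, List.mem_cons])
    rw [List.map_cons, List.sum_cons, ih ht, hcong, hsplit]
    push_cast
    ring

theorem alphNum_eq_counts (someText : String) :
    alphNum someText
      = ((someText.toList.countP (fun x => lettersB.contains x) : Int),
         ((someText.toList.count 'e' : Int) + (someText.toList.count 'E' : Int))) := by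
  unfold alphNum
  rw [PySem.List.foldl_prod_mk
        (f := fun acc ch => if "abcdefghijklmnopqrstuvwxyz".toList.contains ch
                              || (PySem.Str.upper "abcdefghijklmnopqrstuvwxyz").toList.contains ch
                            then acc + 1 else acc)
        (g := fun acc ch => if ch == 'e' || ch == 'E' then acc + 1 else acc)]
  rw [PySem.List.foldl_if_add_one, PySem.List.foldl_if_add_one]
  have hupper : (PySem.Str.upper "abcdefghijklmnopqrstuvwxyz") = "ABCDEFGHIJKLMNOPQRSTUVWXYZ" := by decide
  have hpred : ∀ x : Char,
      ("abcdefghijklmnopqrstuvwxyz".toList.contains x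
        || (PySem.Str.upper "abcdefghijklmnopqrstuvwxyz").toList.contains x)
        = lettersB.contains x := by
    intro x
    rw [hupper]
    have : lettersB = "abcdefghijklmnopqrstuvwxyz".toList ++ "ABCDEFGHIJKLMNOPQRSTUVWXYZ".toList := by decide
    rw [this, List.contains_append]
  have h1 : someText.toList.countP
      (fun x => "abcdefghijklmnopqrstuvwxyz".toList.contains x
        || (PySem.Str.upper "abcdefghijklmnopqrstuvwxyz").toList.contains x)
      = someText.toList.countP (fun x => lettersB.contains x) :=
    List.countP_congr (fun x _ => by rw [hpred x])
  have h2 : someText.toList.countP (fun x => x == 'e' || x == 'E')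
      = someText.toList.count 'e' + someText.toList.count 'E' := by
    have := countP_or_split someText.toList 'e' ['E'] (by decide)
    simpa [List.count] using this
  rw [h1, h2]
  push_cast
  simp

theorem alphNum_alt_eq_counts (someText : String) :
    alphNum_alt someText
      = ((someText.toList.countP (fun x => lettersB.contains x) : Int),
         ((someText.toList.count 'e' : Int) + (someText.toList.count 'E' : Int))) := by
  unfold alphNum_alt
  rw [PySem.Dict.foldl_insert_getD_add_one_eq_counter]
  simp [PySem.Dict.getD_counter]
  have hnd : lettersB.Nodup := by decide
  have := sum_counts someText.toList lettersB hnd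
  simp [this]

-- ===== VERDICT (by name: the statement is the Claim_ definition above) =====
theorem alphNum_spec : Claim_equal_alphNum := by
  intro someText _
  show alphNum someText = alphNum_alt someText
  rw [alphNum_eq_counts, alphNum_alt_eq_counts]
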